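-- pv_equiv track=rewrite | github.com/charlieUWUuwu/Refactoring-of-amazing-qr | amzqr/mylibs/matrix/evaluations.py | evaluation1
-- ===== SOURCE A (Python) =====
-- def evaluation1(m):
--     def ev1(ma):
--         sc = 0
--         for mi in ma:
--             j = 0
--             while j < len(mi)-4:
--                 n = 4
--                 while mi[j:j+n+1] in [[1]*(n+1), [0]*(n+1)]:
--                     n += 1
--                 (sc, j) = (sc+n-2, j+n) if n > 4 else (sc, j+1)
--         return sc
--     return ev1(m) + ev1(list(map(list, zip(*m))))
-- ===== SOURCE B (Python) =====
-- def evaluation1(m):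
--     def score(rows):
--         total = 0
--         for row in rows:
--             run_val, run_len = None, 0
--             for x in row:
--                 if run_val == x:
--                     run_len += 1
--                 else:
--                     if run_len >= 5 and run_val in (0, 1):
--                         total += run_len - 2
--                     run_val, run_len = x, 1
--             if run_len >= 5 and run_val in (0, 1):
--                 total += run_len - 2
--         return total
--     return score(m) + score(list(map(list, zip(*m))))
-- ===== Notes on version B (the rewrite author's own statement) =====
-- stated objective: faster
-- what changed: A probes each position with growing list slices compared against freshly built [1]*(n+1)/[0]*(n+1) templates (quadratic in run length per row); B makes one linear pass per row/column tracking the current run's value and length and flushing runs of length >= 5.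
import Mathlib
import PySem

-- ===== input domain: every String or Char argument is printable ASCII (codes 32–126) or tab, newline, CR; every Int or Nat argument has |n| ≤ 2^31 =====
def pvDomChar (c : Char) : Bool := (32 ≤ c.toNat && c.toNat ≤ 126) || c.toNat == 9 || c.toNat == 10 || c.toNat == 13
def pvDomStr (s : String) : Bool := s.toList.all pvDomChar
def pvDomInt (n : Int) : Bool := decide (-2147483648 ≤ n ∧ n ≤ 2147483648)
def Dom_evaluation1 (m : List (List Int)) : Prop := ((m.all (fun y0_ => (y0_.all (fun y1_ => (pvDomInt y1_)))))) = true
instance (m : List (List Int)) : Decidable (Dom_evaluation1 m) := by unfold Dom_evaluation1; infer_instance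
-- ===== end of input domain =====

-- B replaces A's quadratic slice-probing per row by a single linear pass counting run lengths (objective: faster).


-- zip(*m) (used by both Pythons): columns up to the shortest row
def pvZipStar (m : List (List Int)) : List (List Int) :=
  match m with
  | [] => []
  | r :: rs =>
      if _h : (r :: rs).all (fun row => !row.isEmpty) then
        ((r :: rs).map (fun row => row.headD 0)) :: pvZipStar (r.tail :: rs.map (·.tail))
      else []
termination_by (m.headD []).length
decreasing_by
  simp_all [List.all_cons, List.isEmpty_eq_false_iff]
  cases r with
  | nil => exact absurd rfl _h.1
  | cons a t => simp

-- ===== PORT A =====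
-- inner 'while mi[j:j+n+1] in [[1]*(n+1), [0]*(n+1)]: n += 1'
def pvAInner (mi : List Int) (j n : Nat) : Nat :=
  if h : PySem.List.slice mi (some (j : Int)) (some ((j : Int) + ((n : Int) + 1))) = List.replicate (n + 1) (1 : Int)
       ∨ PySem.List.slice mi (some (j : Int)) (some ((j : Int) + ((n : Int) + 1))) = List.replicate (n + 1) (0 : Int) then
    pvAInner mi j (n + 1)
  else n
termination_by mi.length - n
decreasing_by
  have hs : PySem.List.slice mi (some (j : Int)) (some ((j : Int) + ((n : Int) + 1)))
      = (mi.drop j).take (n + 1) := by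
    have h' := PySem.List.slice_natCast_add (xs := mi) (j := j) (n := n + 1)
    push_cast at h'
    exact h'
  have hlen : n + 1 ≤ mi.length := by
    rcases h with h | h <;>
    · rw [hs] at h
      have := congrArg List.length h
      simp at this
      omega
  omega

-- outer 'while j < len(mi)-4'
def pvALoop (mi : List Int) (j : Nat) (sc : Int) : Int :=
  if h : (j : Int) < (mi.length : Int) - 4 then
    let n := pvAInner mi j 4
    if hn : n > 4 then pvALoop mi (j + n) (sc + (n : Int) - 2)
    else pvALoop mi (j + 1) sc
  else sc
termination_by mi.length - j
decreasing_by
  · omega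
  · omega

def pvAEv1 (ma : List (List Int)) : Int :=
  ma.foldl (fun sc mi => pvALoop mi 0 sc) 0

def evaluation1 (m : List (List Int)) : Int :=
  pvAEv1 m + pvAEv1 (pvZipStar m)

-- ===== PORT B =====
def pvBFlush (total : Int) (rv : Option Int) (rl : Int) : Int :=
  if 5 ≤ rl ∧ (rv = some 0 ∨ rv = some 1) then total + rl - 2 else total

def pvBStep (st : Int × Option Int × Int) (x : Int) : Int × Option Int × Int :=
  if st.2.1 = some x then (st.1, st.2.1, st.2.2 + 1)
  else (pvBFlush st.1 st.2.1 st.2.2, some x, 1)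

def pvBRow (total : Int) (row : List Int) : Int :=
  let st := row.foldl pvBStep (total, none, 0)
  pvBFlush st.1 st.2.1 st.2.2

def pvBScore (rows : List (List Int)) : Int := rows.foldl pvBRow 0

def evaluation1_alt (m : List (List Int)) : Int :=
  pvBScore m + pvBScore (pvZipStar m)

-- ===== PRECONDITION & SPEC =====
def Spec_evaluation1 (m : List (List Int)) (out : Int) : Prop := out = evaluation1_alt m
instance (m : List (List Int)) (out : Int) : Decidable (Spec_evaluation1 m out) := by unfold Spec_evaluation1; infer_instance

-- ===== CLAIM (what is proved, stated in full; the proofs are below) =====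
def Claim_equal_evaluation1 : Prop := ∀ (m : List (List Int)), Dom_evaluation1 m → Spec_evaluation1 m (evaluation1 m)

-- ===== LEMMAS AND PROOFS =====

-- length of the leading run of value v
def pvLead (v : Int) (s : List Int) : Nat := (s.takeWhile (fun y => y == v)).length

def pvFlushT (v : Int) (k : Int) : Int := if 5 ≤ k ∧ (v = 0 ∨ v = 1) then k - 2 else 0

-- penalty contributed by the rest of a row, given an open run of value v and length k
def pvContrib (v : Int) (k : Int) (s : List Int) : Int :=
  match s with
  | [] => pvFlushT v k
  | x :: xs => if x = v then pvContrib v (k + 1) xs else pvFlushT v k + pvContrib x 1 xs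

-- total penalty of one row
def pvPen : List Int → Int
  | [] => 0
  | x :: xs => pvContrib x 1 xs

theorem pvBFold_eq (s : List Int) (t v : Int) (k : Int) :
    (let st := s.foldl pvBStep (t, some v, k); pvBFlush st.1 st.2.1 st.2.2)
      = t + pvContrib v k s := by
  induction s generalizing t v k with
  | nil => simp [pvBFlush, pvContrib, pvFlushT]; split_ifs <;> ring
  | cons x xs ih =>
      by_cases hv : x = v
      · subst hv
        simpa [pvContrib, List.foldl_cons, pvBStep] using ih t x (k + 1)
      · have hne : (some v : Option Int) ≠ some x := by simpa using fun h => hv h.symm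
        have h0 : pvBStep (t, some v, k) x = (pvBFlush t (some v) k, some x, 1) := by
          simp [pvBStep, hne]
        have hfl : pvBFlush t (some v) k = t + pvFlushT v k := by
          simp [pvBFlush, pvFlushT]; split_ifs <;> ring
        simp only [List.foldl_cons, h0, pvContrib, if_neg hv]
        rw [← add_assoc, ← hfl]
        exact ih _ x 1

theorem pvBRow_eq (row : List Int) (t : Int) : pvBRow t row = t + pvPen row := by
  cases row with
  | nil => simp [pvBRow, pvBFlush, pvPen]
  | cons x xs =>
      have h0 : pvBStep (t, none, 0) x = (t, some x, 1) := by
        simp [pvBStep, pvBFlush]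
      simpa [pvBRow, List.foldl_cons, h0, pvPen] using pvBFold_eq xs t x 1

theorem pvLead_cons (v x : Int) (xs : List Int) :
    pvLead v (x :: xs) = if x = v then pvLead v xs + 1 else 0 := by
  by_cases h : x = v <;> simp [pvLead, h]

theorem pvTake_replicate (c : Int) :
    ∀ (s : List Int) (mN : Nat), s.take mN = List.replicate mN c ↔ mN ≤ pvLead c s := by
  intro s
  induction s with
  | nil =>
      intro mN; cases mN <;> simp [pvLead, List.replicate_succ]
  | cons x xs ih =>
      intro mN
      cases mN with
      | zero => simp
      | succ mN' =>
          by_cases h : x = c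
          · simp [List.replicate_succ, pvLead_cons, h, ih]
          · simp [List.replicate_succ, pvLead_cons, h]

theorem pvContrib_eq (s : List Int) : ∀ (v k : Int),
    pvContrib v k s
      = pvFlushT v (k + (pvLead v s : Int)) + pvPen (s.drop (pvLead v s)) := by
  induction s with
  | nil => intro v k; simp [pvContrib, pvLead, pvPen]
  | cons x xs ih =>
      intro v k
      by_cases h : x = v
      · subst h
        rw [show pvContrib x k (x :: xs) = pvContrib x (k + 1) xs from by
              simp [pvContrib], ih, pvLead_cons, if_pos rfl]
        have h2 : k + 1 + (pvLead x xs : Int) = k + ((pvLead x xs + 1 : Nat) : Int) := by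
          push_cast; ring
        rw [h2, List.drop_succ_cons]
      · rw [show pvContrib v k (x :: xs) = pvFlushT v k + pvContrib x 1 xs from by
              simp [pvContrib, h], pvLead_cons]
        simp [h, pvPen]

theorem pvContrib_small : ∀ (s : List Int) (v k : Int),
    1 ≤ k → k + s.length ≤ 4 → pvContrib v k s = 0 := by
  intro s
  induction s with
  | nil =>
      intro v k _ hk
      simp only [List.length_nil] at hk
      unfold pvContrib pvFlushT
      rw [if_neg (by rintro ⟨h5, -⟩; omega)]
  | cons x xs ih =>
      intro v k h1 hk
      have hk' : k + (xs.length : Int) ≤ 3 := by simp at hk; omega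
      by_cases h : x = v
      · rw [show pvContrib v k (x :: xs) = pvContrib v (k + 1) xs from by simp [pvContrib, h]]
        exact ih v (k + 1) (by omega) (by omega)
      · rw [show pvContrib v k (x :: xs) = pvFlushT v k + pvContrib x 1 xs from by
              simp [pvContrib, h]]
        rw [ih x 1 le_rfl (by omega)]
        unfold pvFlushT
        rw [if_neg (by rintro ⟨h5, -⟩; omega), add_zero]

theorem pvPen_small (s : List Int) (hs : s.length ≤ 4) : pvPen s = 0 := by
  cases s with
  | nil => simp [pvPen]
  | cons x xs =>
      simp only [pvPen]
      exact pvContrib_small xs x 1 le_rfl (by simp at hs; omega)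

-- dropping the head does not change the penalty while the leading run stays unscored
theorem pvPen_tail (x : Int) (xs : List Int)
    (h : ¬ (5 ≤ 1 + pvLead x xs ∧ (x = 0 ∨ x = 1))) :
    pvPen (x :: xs) = pvPen xs := by
  have h1 : pvPen (x :: xs) = pvFlushT x (1 + (pvLead x xs : Int)) + pvPen (xs.drop (pvLead x xs)) := by
    simpa [pvPen] using pvContrib_eq xs x 1
  have hz : pvFlushT x (1 + (pvLead x xs : Int)) = 0 := by
    simp [pvFlushT]; intro h5 hx; exact absurd ⟨by omega, hx⟩ h
  rw [h1, hz, zero_add]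
  cases xs with
  | nil => simp [pvPen]
  | cons y ys =>
      by_cases hy : y = x
      · subst hy
        rw [pvLead_cons, if_pos rfl, List.drop_succ_cons]
        have h2 : pvPen (y :: ys) = pvFlushT y (1 + (pvLead y ys : Int)) + pvPen (ys.drop (pvLead y ys)) := by
          simpa [pvPen] using pvContrib_eq ys y 1
        have hlead : pvLead y (y :: ys) = pvLead y ys + 1 := by simp [pvLead_cons]
        rw [hlead] at h
        have hz2 : pvFlushT y (1 + (pvLead y ys : Int)) = 0 := by
          simp [pvFlushT]; intro h5 hx; exact absurd ⟨by omega, hx⟩ h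
        rw [h2, hz2, zero_add]
      · rw [pvLead_cons, if_neg hy, List.drop_zero]

theorem pvAInner_eq (mi : List Int) (j n : Nat) :
    pvAInner mi j n = max n (max (pvLead 0 (mi.drop j)) (pvLead 1 (mi.drop j))) := by
  fun_induction pvAInner mi j n with
  | case1 n h ih =>
      have hs : PySem.List.slice mi (some (j : Int)) (some ((j : Int) + ((n : Int) + 1)))
          = (mi.drop j).take (n + 1) := by
        have h' := PySem.List.slice_natCast_add (xs := mi) (j := j) (n := n + 1)
        push_cast at h'
        exact h'
      rw [hs] at h
      have hL : n + 1 ≤ max (pvLead 0 (mi.drop j)) (pvLead 1 (mi.drop j)) := by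
        rcases h with h | h
        · have := (pvTake_replicate 1 (mi.drop j) (n + 1)).mp h; omega
        · have := (pvTake_replicate 0 (mi.drop j) (n + 1)).mp h; omega
      rw [ih]; omega
  | case2 n h =>
      have hs : PySem.List.slice mi (some (j : Int)) (some ((j : Int) + ((n : Int) + 1)))
          = (mi.drop j).take (n + 1) := by
        have h' := PySem.List.slice_natCast_add (xs := mi) (j := j) (n := n + 1)
        push_cast at h'
        exact h'
      rw [hs] at h
      rw [not_or] at h
      have h1 : ¬ (n + 1 ≤ pvLead 1 (mi.drop j)) :=
        fun hc => h.1 ((pvTake_replicate 1 (mi.drop j) (n + 1)).mpr hc)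
      have h0 : ¬ (n + 1 ≤ pvLead 0 (mi.drop j)) :=
        fun hc => h.2 ((pvTake_replicate 0 (mi.drop j) (n + 1)).mpr hc)
      omega

theorem pvALoop_eq (mi : List Int) (j : Nat) (sc : Int) :
    pvALoop mi j sc = sc + pvPen (mi.drop j) := by
  fun_induction pvALoop mi j sc with
  | case1 j sc h n hn ih =>
      rw [ih]
      have hlen : 5 ≤ (mi.drop j).length := by
        rw [List.length_drop]; omega
      obtain ⟨x, xs, hs⟩ : ∃ x xs, mi.drop j = x :: xs := by
        cases hxx : mi.drop j with
        | nil => rw [hxx] at hlen; simp at hlen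
        | cons a b => exact ⟨a, b, rfl⟩
      have hn' : n = max 4 (max (pvLead 0 (mi.drop j)) (pvLead 1 (mi.drop j))) :=
        pvAInner_eq mi j 4
      have hL : 4 < max (pvLead 0 (mi.drop j)) (pvLead 1 (mi.drop j)) := by omega
      have hx : (x = 0 ∨ x = 1) ∧ n = pvLead x xs + 1 := by
        rw [hs] at hL hn'
        by_cases h0 : x = 0
        · subst h0
          rw [pvLead_cons, pvLead_cons] at hL hn'
          norm_num at hL hn'
          exact ⟨Or.inl rfl, by omega⟩
        · by_cases h1 : x = 1
          · subst h1
            rw [pvLead_cons, pvLead_cons] at hL hn'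
            norm_num at hL hn'
            exact ⟨Or.inr rfl, by omega⟩
          · rw [pvLead_cons, pvLead_cons, if_neg h0, if_neg h1] at hL
            omega
      have hpen : pvPen (mi.drop j) = ((n : Int) - 2) + pvPen (xs.drop (pvLead x xs)) := by
        rw [hs]
        show pvContrib x 1 xs = _
        rw [pvContrib_eq xs x 1]
        have : pvFlushT x (1 + (pvLead x xs : Int)) = (n : Int) - 2 := by
          unfold pvFlushT
          rw [if_pos ⟨by omega, hx.1⟩]
          omega
        rw [this]
      have hdrop : mi.drop (j + n) = xs.drop (pvLead x xs) := by
        rw [← List.drop_drop, hs, hx.2, List.drop_succ_cons]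
      rw [hpen, hdrop]
      ring
  | case2 j sc h n hn ih =>
      rw [ih]
      have hlen : 5 ≤ (mi.drop j).length := by
        rw [List.length_drop]; omega
      obtain ⟨x, xs, hs⟩ : ∃ x xs, mi.drop j = x :: xs := by
        cases hxx : mi.drop j with
        | nil => rw [hxx] at hlen; simp at hlen
        | cons a b => exact ⟨a, b, rfl⟩
      have hn' : n = max 4 (max (pvLead 0 (mi.drop j)) (pvLead 1 (mi.drop j))) :=
        pvAInner_eq mi j 4
      have hL : max (pvLead 0 (mi.drop j)) (pvLead 1 (mi.drop j)) ≤ 4 := by omega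
      have hdrop : mi.drop (j + 1) = xs := by
        rw [← List.drop_drop, hs, List.drop_succ_cons, List.drop_zero]
      rw [hdrop, hs]
      rw [pvPen_tail x xs]
      rintro ⟨h5, hx01⟩
      rw [hs, pvLead_cons, pvLead_cons] at hL
      rcases hx01 with h0 | h0 <;> subst h0 <;> norm_num at hL <;> omega
  | case3 j sc h =>
      rw [pvPen_small (mi.drop j) (by rw [List.length_drop]; omega)]
      ring

theorem pvScore_eq (rows : List (List Int)) : pvBScore rows = pvAEv1 rows := by
  have hrow : ∀ (row : List Int) (t : Int), pvBRow t row = pvALoop row 0 t := by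
    intro row t
    rw [pvBRow_eq, pvALoop_eq, List.drop_zero]
  have key : ∀ (rs : List (List Int)) (t : Int),
      rs.foldl pvBRow t = rs.foldl (fun sc mi => pvALoop mi 0 sc) t := by
    intro rs
    induction rs with
    | nil => intro t; rfl
    | cons r rs ih => intro t; simp only [List.foldl_cons, hrow]; exact ih _
  exact key rows 0

-- ===== VERDICT (by name: the statement is the Claim_ definition above) =====
theorem evaluation1_spec : Claim_equal_evaluation1 := by
  intro m _
  unfold Spec_evaluation1 evaluation1 evaluation1_alt
  rw [pvScore_eq, pvScore_eq]
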